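-- pv_equiv track=rewrite | github.com/foubari/dgm_tire | src/models/gmrf_mvae/cov_model.py | compute_n_off_diag
-- ===== SOURCE A (Python) =====
-- def compute_n_off_diag(modalities_dim):
--     """
--     Compute the number of lower off-diagonal elements.
--
--     For n modalities with dimensions [d1, d2, ..., dn], computes the total
--     number of elements in the off-diagonal blocks of the covariance matrix.
--     """
--     n = len(modalities_dim)
--     partial_sums = [modalities_dim[-1]]
--     for i in range(n-2):
--         partial_sums.append(partial_sums[-1] + modalities_dim[-i-2])
--     partial_sums = partial_sums[::-1]
--     res = 0
--     for i in range(n-1):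
--         res += partial_sums[i] * modalities_dim[i]
--     return res
-- ===== SOURCE B (Python) =====
-- def compute_n_off_diag(modalities_dim):
--     """Single forward pass with a running prefix sum: accumulates sum over i<j of d_i*d_j."""
--     res = 0
--     prefix = 0
--     for d in modalities_dim:
--         res += prefix * d
--         prefix += d
--     return res
-- ===== Notes on version B (the rewrite author's own statement) =====
-- stated objective: simpler
-- what changed: Replaced the stored suffix-sum list, its reversal and the second index loop with one forward pass keeping a running prefix sum (res += prefix*d; prefix += d), computing the same sum of d_i*d_j over i<j.
-- outside the precondition, e.g. on compute_n_off_diag([]): A raises IndexError, B returns 0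
import Mathlib
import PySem

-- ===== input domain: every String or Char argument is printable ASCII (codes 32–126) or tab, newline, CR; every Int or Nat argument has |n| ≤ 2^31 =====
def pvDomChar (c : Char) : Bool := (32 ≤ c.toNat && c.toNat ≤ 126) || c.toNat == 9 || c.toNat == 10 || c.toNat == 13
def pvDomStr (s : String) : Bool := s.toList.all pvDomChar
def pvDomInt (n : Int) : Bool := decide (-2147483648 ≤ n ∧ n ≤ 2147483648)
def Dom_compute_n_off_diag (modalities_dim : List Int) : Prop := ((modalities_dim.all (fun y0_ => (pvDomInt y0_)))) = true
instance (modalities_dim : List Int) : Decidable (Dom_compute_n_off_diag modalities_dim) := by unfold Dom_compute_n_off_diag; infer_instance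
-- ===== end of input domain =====

-- B replaces A's stored suffix-sum list + reversal + index loop by one forward pass with a
-- running prefix sum: simpler, O(1) extra space (measured constant-factor faster).

-- ===== PORT A =====
def compute_n_off_diag (modalities_dim : List Int) : Int :=
  let n : Int := modalities_dim.length
  let partial_sums : List Int :=
    (PySem.List.pyRange 0 (n - 2) 1).foldl
      (fun ps i => ps ++ [PySem.List.pyGetD ps (-1) 0 + PySem.List.pyGetD modalities_dim (-i - 2) 0])
      [PySem.List.pyGetD modalities_dim (-1) 0]
  let partial_sums := partial_sums.reverse
  (PySem.List.pyRange 0 (n - 1) 1).foldl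
    (fun res i => res + PySem.List.pyGetD partial_sums i 0 * PySem.List.pyGetD modalities_dim i 0) 0

-- ===== PORT B =====
def compute_n_off_diag_alt (modalities_dim : List Int) : Int :=
  (modalities_dim.foldl (fun (p : Int × Int) d => (p.1 + p.2 * d, p.2 + d)) (0, 0)).1

-- ===== PRECONDITION & SPEC =====
-- Pre_ excludes only the empty list, on which Python A raises IndexError when it reads the last element.
def Pre_compute_n_off_diag (modalities_dim : List Int) : Prop := modalities_dim ≠ []
instance (modalities_dim : List Int) : Decidable (Pre_compute_n_off_diag modalities_dim) := by unfold Pre_compute_n_off_diag; infer_instance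
def pvWitness_compute_n_off_diag : List Int := [2, 3, 4]

def Spec_compute_n_off_diag (modalities_dim : List Int) (out : Int) : Prop := out = compute_n_off_diag_alt modalities_dim
instance (modalities_dim : List Int) (out : Int) : Decidable (Spec_compute_n_off_diag modalities_dim out) := by unfold Spec_compute_n_off_diag; infer_instance

-- ===== CLAIM (what is proved, stated in full; the proofs are below) =====
def Claim_equal_compute_n_off_diag : Prop := ∀ (modalities_dim : List Int), Dom_compute_n_off_diag modalities_dim → Pre_compute_n_off_diag modalities_dim → Spec_compute_n_off_diag modalities_dim (compute_n_off_diag modalities_dim)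

-- ===== LEMMAS AND PROOFS =====

/-- Reference value: sum over i<j of d_i * d_j, written by structural recursion. -/
def offDiagSum : List Int → Int
  | [] => 0
  | d :: t => d * t.sum + offDiagSum t

/-- suffix sum from position j -/
def suf (m : List Int) (j : Nat) : Int := (m.drop j).sum

lemma suf_succ (m : List Int) (j : Nat) (hj : j < m.length) :
    suf m j = m[j] + suf m (j + 1) := by
  unfold suf
  rw [List.drop_eq_getElem_cons hj, List.sum_cons]

lemma alt_invariant (l : List Int) (r p : Int) :
    l.foldl (fun (q : Int × Int) d => (q.1 + q.2 * d, q.2 + d)) (r, p)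
      = (r + p * l.sum + offDiagSum l, p + l.sum) := by
  induction l generalizing r p with
  | nil => simp [offDiagSum]
  | cons d t ih =>
    simp only [List.foldl_cons, ih, offDiagSum, List.sum_cons, Prod.mk.injEq]
    constructor <;> ring

lemma alt_eq_offDiagSum (m : List Int) : compute_n_off_diag_alt m = offDiagSum m := by
  unfold compute_n_off_diag_alt
  rw [alt_invariant]
  ring

lemma ps_build (m : List Int) (t : Nat) (ht : t + 2 ≤ m.length) :
    (PySem.List.pyRange 0 (t : Int) 1).foldl
      (fun ps i => ps ++ [PySem.List.pyGetD ps (-1) 0 + PySem.List.pyGetD m (-i - 2) 0])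
      [suf m (m.length - 1)]
      = (List.range (t + 1)).map (fun k => suf m (m.length - 1 - k)) := by
  induction t with
  | zero => simp
  | succ t ih =>
    have h1 : (0 : Int) ≤ t := by positivity
    have hpr : PySem.List.pyRange 0 ((t : Nat) + 1 : Int) 1
        = PySem.List.pyRange 0 (t : Int) 1 ++ [(t : Int)] :=
      PySem.List.pyRange_one_succ_right h1
    have ht' : t + 2 ≤ m.length := by omega
    push_cast
    rw [hpr, List.foldl_append, ih ht']
    simp only [List.foldl_cons, List.foldl_nil]
    have hlast : PySem.List.pyGetD ((List.range (t + 1)).map (fun k => suf m (m.length - 1 - k))) (-1) 0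
        = suf m (m.length - 1 - t) := by
      rw [List.range_succ, List.map_append]
      simp only [List.map_cons, List.map_nil]
      exact PySem.List.pyGetD_neg_one_append_singleton _ _ _
    have hidx : PySem.List.pyGetD m (-(t : Int) - 2) 0 = m[m.length - (t + 2)]'(by omega) := by
      rw [show (-(t : Int) - 2) = -((t + 2 : Nat) : Int) by push_cast; ring]
      exact PySem.List.pyGetD_neg_natCast m (t + 2) 0 (by omega) ht'
    rw [hlast, hidx]
    conv_rhs => rw [List.range_succ]
    rw [List.map_append]
    congr 1
    simp only [List.map_cons, List.map_nil, List.cons.injEq, and_true]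
    have h3 := suf_succ m (m.length - (t + 2)) (by omega)
    rw [show m.length - (t + 2) + 1 = m.length - 1 - t by omega] at h3
    rw [show m.length - 1 - (t + 1) = m.length - (t + 2) by omega, h3]
    ring

lemma range_sum_eq_offDiagSum (m : List Int) :
    (((List.range (m.length - 1)).map (fun k => suf m (k + 1) * m.getD k 0)).sum) = offDiagSum m := by
  induction m with
  | nil => simp [offDiagSum]
  | cons d t ih =>
    cases t with
    | nil => simp [offDiagSum]
    | cons e u =>
      simp only [List.length_cons, Nat.add_sub_cancel] at ih ⊢
      rw [List.range_succ_eq_map]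
      simp only [List.map_cons, List.map_map, List.sum_cons]
      have hf : ((List.range u.length).map
          ((fun k => suf (d :: e :: u) (k + 1) * (d :: e :: u).getD k 0) ∘ Nat.succ)).sum
          = ((List.range u.length).map (fun k => suf (e :: u) (k + 1) * (e :: u).getD k 0)).sum := by
        rfl
      rw [hf, ih]
      have h1 : suf (d :: e :: u) 1 = (e :: u).sum := by simp [suf]
      have h2 : (d :: e :: u).getD 0 0 = d := rfl
      rw [h1, h2]
      simp only [offDiagSum, List.sum_cons]
      ring

lemma rev_map_range (f : Nat → Int) (N : Nat) :
    ((List.range N).map f).reverse = (List.range N).map (fun k => f (N - 1 - k)) := by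
  apply List.ext_getElem
  · simp
  · intro i h1 h2
    simp [List.getElem_reverse]

lemma first_elem (m : List Int) (hm : m ≠ []) :
    PySem.List.pyGetD m (-1) 0 = suf m (m.length - 1) := by
  have hl : 1 ≤ m.length := List.length_pos_iff.mpr hm
  have h1 : PySem.List.pyGetD m (-((1 : Nat) : Int)) 0 = m[m.length - 1]'(by omega) :=
    PySem.List.pyGetD_neg_natCast m 1 0 (by omega) hl
  have h2 := suf_succ m (m.length - 1) (by omega)
  have h3 : suf m (m.length - 1 + 1) = 0 := by
    unfold suf
    rw [show m.length - 1 + 1 = m.length by omega]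
    simp
  rw [h2, h3]
  simpa using h1

lemma A_eq_offDiagSum (m : List Int) (hm : m ≠ []) : compute_n_off_diag m = offDiagSum m := by
  have hl : 1 ≤ m.length := List.length_pos_iff.mpr hm
  simp only [compute_n_off_diag]
  by_cases h2 : 2 ≤ m.length
  · -- n ≥ 2
    rw [first_elem m hm]
    have hc2 : ((m.length : Int) - 2) = ((m.length - 2 : Nat) : Int) := by push_cast [h2]; ring
    have hc1 : ((m.length : Int) - 1) = ((m.length - 1 : Nat) : Int) := by push_cast [hl]; ring
    rw [hc2, ps_build m (m.length - 2) (by omega)]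
    rw [show m.length - 2 + 1 = m.length - 1 by omega]
    rw [rev_map_range]
    have hpsr : (List.range (m.length - 1)).map (fun k => suf m (m.length - 1 - (m.length - 1 - 1 - k)))
        = (List.range (m.length - 1)).map (fun k => suf m (k + 1)) := by
      apply List.map_congr_left
      intro k hk
      rw [List.mem_range] at hk
      congr 1
      omega
    rw [hpsr]
    rw [hc1, PySem.List.pyRange_zero_natCast, List.foldl_map]
    rw [PySem.List.foldl_add]
    rw [zero_add, ← range_sum_eq_offDiagSum m]
    apply congrArg
    apply List.map_congr_left
    intro k hk
    rw [List.mem_range] at hk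
    rw [PySem.List.pyGetD_natCast, PySem.List.pyGetD_natCast,
        PySem.List.getD_map_range _ _ _ _ hk]
  · -- n = 1
    have h1 : m.length = 1 := by omega
    obtain ⟨d, hd⟩ : ∃ d, m = [d] := by
      cases m with
      | nil => simp at hl
      | cons a t =>
        cases t with
        | nil => exact ⟨a, rfl⟩
        | cons b u => simp at h1
    subst hd
    norm_num [PySem.List.pyRange_one_eq_nil, offDiagSum]

-- ===== VERDICT (by name: the statement is the Claim_ definition above) =====
theorem compute_n_off_diag_spec : Claim_equal_compute_n_off_diag := by
  intro m _ hpre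
  unfold Spec_compute_n_off_diag
  rw [A_eq_offDiagSum m hpre, alt_eq_offDiagSum]
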